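-- pv_equiv track=rewrite | github.com/jamilr/coderbyte_training | closest_enemy.py | calc
-- ===== SOURCE A (Python) =====
-- from typing import List
--
-- def calc(seq: List[int]) -> int:
--     n = len(seq)
--     i = 0
--     while i < n and seq[i] != 1:
--         i += 1
--     if i == n:
--         return -1
--     j = i-1
--     while j >= 0 and seq[j] != 2:
--         j -= 1
--     left_dist = abs(j-i)
--     j = i + 1
--     while j < n and seq[j] != 2:
--         j += 1
--     right_dist = abs(j-i)
--     return min(left_dist, right_dist)
-- ===== SOURCE B (Python) =====
-- def calc(seq):
--     n = len(seq)
--     try: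
--         i = seq.index(1)
--     except ValueError:
--         return -1
--     best = min(i + 1, n - i)
--     for k, v in enumerate(seq):
--         if v == 2:
--             best = min(best, abs(k - i))
--     return best
-- ===== Notes on version B (the rewrite author's own statement) =====
-- stated objective: simpler
-- what changed: Replaces the two directional early-exit sentinel scans around the first 1 with list.index to locate the 1 and one full forward pass that minimises |k-i| over all 2-positions, seeded with min(i+1, n-i) to reproduce A's boundary sentinels.
import Mathlib
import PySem

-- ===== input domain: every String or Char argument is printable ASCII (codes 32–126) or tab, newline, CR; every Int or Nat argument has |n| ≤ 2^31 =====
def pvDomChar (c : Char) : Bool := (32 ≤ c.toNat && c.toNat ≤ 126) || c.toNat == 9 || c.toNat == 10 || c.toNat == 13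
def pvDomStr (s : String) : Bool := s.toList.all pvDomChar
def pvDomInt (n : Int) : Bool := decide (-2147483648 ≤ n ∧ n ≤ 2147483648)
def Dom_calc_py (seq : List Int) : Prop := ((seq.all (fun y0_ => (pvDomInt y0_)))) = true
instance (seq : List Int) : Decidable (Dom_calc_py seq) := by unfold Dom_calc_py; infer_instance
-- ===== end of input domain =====

-- B replaces A's two directional early-exit sentinel scans with index() plus one full
-- forward minimising pass seeded with the boundary sentinels; objective: simpler.

-- ===== PORT A =====
-- while i < n and seq[i] != 1: i += 1
def calcFindStart (seq : List Int) (i : Int) : Int :=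
  if h : i < (seq.length : Int) ∧ (PySem.List.pyGet? seq i).getD 0 ≠ 1 then
    calcFindStart seq (i + 1)
  else i
termination_by ((seq.length : Int) - i).toNat
decreasing_by omega

-- while j >= 0 and seq[j] != 2: j -= 1
def calcFindLeft (seq : List Int) (j : Int) : Int :=
  if h : 0 ≤ j ∧ (PySem.List.pyGet? seq j).getD 0 ≠ 2 then
    calcFindLeft seq (j - 1)
  else j
termination_by (j + 1).toNat
decreasing_by omega

-- while j < n and seq[j] != 2: j += 1
def calcFindRight (seq : List Int) (j : Int) : Int :=
  if h : j < (seq.length : Int) ∧ (PySem.List.pyGet? seq j).getD 0 ≠ 2 then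
    calcFindRight seq (j + 1)
  else j
termination_by ((seq.length : Int) - j).toNat
decreasing_by omega

def calc_py (seq : List Int) : Int :=
  let n : Int := seq.length
  let i := calcFindStart seq 0
  if i = n then -1
  else
    let jl := calcFindLeft seq (i - 1)
    let left_dist := |jl - i|
    let jr := calcFindRight seq (i + 1)
    let right_dist := |jr - i|
    min left_dist right_dist

-- ===== PORT B =====
def calc_py_alt (seq : List Int) : Int :=
  let n : Int := seq.length
  match PySem.List.index? seq 1 with
  | none => -1
  | some i0 =>
    let i : Int := i0
    let best0 := min (i + 1) (n - i)
    (PySem.List.enumerate seq).foldl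
      (fun best kv => if kv.2 = 2 then min best |kv.1 - i| else best) best0

-- ===== PRECONDITION & SPEC =====
def Spec_calc_py (seq : List Int) (out : Int) : Prop := out = calc_py_alt seq
instance (seq : List Int) (out : Int) : Decidable (Spec_calc_py seq out) := by unfold Spec_calc_py; infer_instance

-- ===== CLAIM (what is proved, stated in full; the proofs are below) =====
def Claim_equal_calc_py : Prop := ∀ (seq : List Int), Dom_calc_py seq → Spec_calc_py seq (calc_py seq)

-- ===== LEMMAS AND PROOFS =====

lemma pvNN (L i : Nat) (h : i < L) :
    min |-1 - (i:Int)| |(L:Int) - (i:Int)| = min ((i + 1 : Nat) : Int) ((L:Int) - (i:Int)) := by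
  simp only [Int.abs_eq_natAbs, min_def]; split_ifs <;> omega

lemma pvNS (L i k' : Nat) (h : i < L) (h2 : k' < L - (i+1)) :
    min |-1 - (i:Int)| |((i + 1 : Nat) : Int) + (k':Int) - (i:Int)|
      = min (min ((i + 1 : Nat) : Int) ((L:Int) - (i:Int))) ((i:Int) + 1 + (k':Int) - (i:Int)) := by
  simp only [Int.abs_eq_natAbs, min_def]; split_ifs <;> omega

lemma pvSN (L i k : Nat) (h : i < L) (h2 : k < i) :
    min |(i:Int) - 1 - (k:Int) - (i:Int)| |(L:Int) - (i:Int)|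
      = min (min ((i + 1 : Nat) : Int) ((L:Int) - (i:Int))) ((i:Int) - (0 + (i:Int) - 1 - (k:Int))) := by
  simp only [Int.abs_eq_natAbs, min_def]; split_ifs <;> omega

lemma pvSS (L i k k' : Nat) (h : i < L) (h2 : k < i) (h3 : k' < L - (i+1)) :
    min |(i:Int) - 1 - (k:Int) - (i:Int)| |((i + 1 : Nat) : Int) + (k':Int) - (i:Int)|
      = min (min (min ((i + 1 : Nat) : Int) ((L:Int) - (i:Int))) ((i:Int) - (0 + (i:Int) - 1 - (k:Int))))
          ((i:Int) + 1 + (k':Int) - (i:Int)) := by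
  simp only [Int.abs_eq_natAbs, min_def]; split_ifs <;> omega

lemma pvMinStep (b x y z : Int) (hyx : y ≤ x) (hzy : z = y) : min (min b x) y = min b z := by
  subst hzy; simp only [min_def]; split_ifs <;> omega

lemma pvMinStep2 (b x y z : Int) (hxy : x ≤ y) (hzx : z = x) : min (min b x) y = min b z := by
  subst hzx; simp only [min_def]; split_ifs <;> omega

lemma calcFindStart_eq (seq : List Int) :
    ∀ fuel m : Nat, seq.length = m + fuel →
    calcFindStart seq (m : Int) =
      (match PySem.List.index? (seq.drop m) 1 with
       | none => (seq.length : Int)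
       | some k => ((m : Int) + k)) := by
  intro fuel
  induction fuel with
  | zero =>
    intro m hm
    rw [calcFindStart, dif_neg (by omega)]
    have hd : seq.drop m = [] := List.drop_eq_nil_of_le (by omega)
    simp [hd, PySem.List.index?]
    omega
  | succ f ih =>
    intro m hm
    have hml : m < seq.length := by omega
    have hd : seq.drop m = seq[m] :: seq.drop (m + 1) := List.drop_eq_getElem_cons hml
    rw [calcFindStart]
    by_cases h1 : seq[m] = (1 : Int)
    · rw [dif_neg]
      · rw [hd, h1, PySem.List.index?_cons_self]
        simp
      · simp [PySem.List.pyGet?_natCast, List.getElem?_eq_getElem hml, h1]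
    · rw [dif_pos]
      · have hc : ((m : Int) + 1) = ((m + 1 : Nat) : Int) := by push_cast; ring
        rw [hc, ih (m + 1) (by omega), hd, PySem.List.index?_cons_of_ne _ h1]
        cases PySem.List.index? (seq.drop (m + 1)) 1 with
        | none => simp
        | some k => simp; ring
      · exact ⟨by omega, by simp [PySem.List.pyGet?_natCast, List.getElem?_eq_getElem hml, h1]⟩

lemma calcFindRight_eq (seq : List Int) :
    ∀ fuel m : Nat, seq.length = m + fuel →
    calcFindRight seq (m : Int) =
      (match PySem.List.index? (seq.drop m) 2 with
       | none => (seq.length : Int)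
       | some k => ((m : Int) + k)) := by
  intro fuel
  induction fuel with
  | zero =>
    intro m hm
    rw [calcFindRight, dif_neg (by omega)]
    have hd : seq.drop m = [] := List.drop_eq_nil_of_le (by omega)
    simp [hd, PySem.List.index?]
    omega
  | succ f ih =>
    intro m hm
    have hml : m < seq.length := by omega
    have hd : seq.drop m = seq[m] :: seq.drop (m + 1) := List.drop_eq_getElem_cons hml
    rw [calcFindRight]
    by_cases h1 : seq[m] = (2 : Int)
    · rw [dif_neg]
      · rw [hd, h1, PySem.List.index?_cons_self]
        simp
      · simp [PySem.List.pyGet?_natCast, List.getElem?_eq_getElem hml, h1]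
    · rw [dif_pos]
      · have hc : ((m : Int) + 1) = ((m + 1 : Nat) : Int) := by push_cast; ring
        rw [hc, ih (m + 1) (by omega), hd, PySem.List.index?_cons_of_ne _ h1]
        cases PySem.List.index? (seq.drop (m + 1)) 2 with
        | none => simp
        | some k => simp; ring
      · exact ⟨by omega, by simp [PySem.List.pyGet?_natCast, List.getElem?_eq_getElem hml, h1]⟩

lemma calcFindLeft_eq (seq : List Int) :
    ∀ i : Nat, i ≤ seq.length →
    calcFindLeft seq ((i : Int) - 1) =
      (match PySem.List.index? ((seq.take i).reverse) 2 with
       | none => -1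
       | some k => (i : Int) - 1 - k) := by
  intro i
  induction i with
  | zero =>
    intro _
    rw [calcFindLeft, dif_neg (by omega)]
    simp [PySem.List.index?]
  | succ i ih =>
    intro hi
    have hil : i < seq.length := by omega
    have ht : (seq.take (i + 1)).reverse = seq[i] :: (seq.take i).reverse := by
      rw [List.take_add_one, List.getElem?_eq_getElem hil]
      simp
    have hc : ((i + 1 : Nat) : Int) - 1 = (i : Int) := by push_cast; ring
    rw [hc, calcFindLeft]
    by_cases h2 : seq[i] = (2 : Int)
    · rw [dif_neg]
      · rw [ht, h2, PySem.List.index?_cons_self]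
        push_cast; ring
      · simp [PySem.List.pyGet?_natCast, List.getElem?_eq_getElem hil, h2]
    · rw [dif_pos]
      · rw [ih (by omega), ht, PySem.List.index?_cons_of_ne _ h2]
        cases PySem.List.index? ((seq.take i).reverse) 2 with
        | none => simp
        | some k => simp; ring
      · exact ⟨by omega, by simp [PySem.List.pyGet?_natCast, List.getElem?_eq_getElem hil, h2]⟩

lemma foldl_left_part (i : Int) (l : List Int) (b s : Int) (hs : s + l.length ≤ i) :
    (PySem.List.enumerate l s).foldl
      (fun best kv => if kv.2 = 2 then min best |kv.1 - i| else best) b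
    = (match PySem.List.index? l.reverse 2 with
       | none => b
       | some k => min b (i - (s + (l.length : Int) - 1 - k))) := by
  induction l using List.reverseRecOn with
  | nil => simp [PySem.List.enumerate_nil, PySem.List.index?]
  | append_singleton l' x ih =>
    have hs' : s + l'.length ≤ i := by simp at hs; omega
    rw [PySem.List.enumerate_append, List.foldl_append, ih hs']
    rw [List.reverse_append, List.reverse_singleton, List.singleton_append]
    simp only [PySem.List.enumerate_cons, PySem.List.enumerate_nil, List.foldl_cons,
      List.foldl_nil, List.length_append, List.length_singleton]
    have habs : |s + (l'.length : Int) - i| = i - (s + (l'.length : Int)) := by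
      rw [abs_sub_comm, abs_of_nonneg (by omega)]
    by_cases h2 : x = (2 : Int)
    · subst h2
      rw [PySem.List.index?_cons_self]
      cases hk : PySem.List.index? l'.reverse 2 with
      | none =>
        simp only [habs, if_true]
        congr 1; push_cast; ring
      | some k =>
        simp only [habs, if_true]
        exact pvMinStep _ _ _ _ (by omega) (by push_cast; ring)
    · rw [PySem.List.index?_cons_of_ne _ h2]
      cases hk : PySem.List.index? l'.reverse 2 with
      | none => simp [h2]
      | some k =>
        simp only [Option.map_some, if_neg h2]
        congr 1; push_cast; ring

lemma foldl_right_part (i : Int) :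
    ∀ (l : List Int) (b s : Int), i < s →
    (PySem.List.enumerate l s).foldl
      (fun best kv => if kv.2 = 2 then min best |kv.1 - i| else best) b
    = (match PySem.List.index? l 2 with
       | none => b
       | some k => min b (s + (k : Int) - i)) := by
  intro l
  induction l with
  | nil => intro b s _; simp [PySem.List.enumerate_nil, PySem.List.index?]
  | cons x l' ih =>
    intro b s hs
    rw [PySem.List.enumerate_cons, List.foldl_cons]
    by_cases h2 : x = (2 : Int)
    · subst h2
      rw [if_pos rfl, abs_of_nonneg (by omega), ih _ _ (by omega),
        PySem.List.index?_cons_self]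
      cases hk : PySem.List.index? l' 2 with
      | none => simp
      | some k =>
        simp only []
        exact pvMinStep2 _ _ _ _ (by omega) (by push_cast; ring)
    · rw [if_neg h2, ih _ _ (by omega), PySem.List.index?_cons_of_ne _ h2]
      cases hk : PySem.List.index? l' 2 with
      | none => simp
      | some k => simp only [Option.map_some]; congr 1; push_cast; ring

-- ===== VERDICT (by name: the statement is the Claim_ definition above) =====
set_option maxHeartbeats 1000000 in
theorem calc_py_spec : Claim_equal_calc_py := by
  unfold Claim_equal_calc_py
  intro seq _
  unfold Spec_calc_py calc_py calc_py_alt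
  have hstart := calcFindStart_eq seq seq.length 0 (by omega)
  rw [List.drop_zero] at hstart
  simp only [Nat.cast_zero] at hstart
  cases h1 : PySem.List.index? seq 1 with
  | none =>
    rw [h1] at hstart
    simp only [hstart]
    simp
  | some i0 =>
    obtain ⟨hk, hv, -⟩ := PySem.List.getElem_of_index?_eq_some h1
    rw [h1] at hstart
    simp only [zero_add] at hstart
    simp only [hstart]
    rw [if_neg (show ¬((i0 : Int) = (seq.length : Int)) by omega)]
    -- A side scans
    rw [calcFindLeft_eq seq i0 (le_of_lt hk)]
    have hc1 : (i0 : Int) + 1 = ((i0 + 1 : Nat) : Int) := by push_cast; ring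
    rw [hc1, calcFindRight_eq seq (seq.length - (i0 + 1)) (i0 + 1) (by omega)]
    -- B side fold, split at position i0
    have hseq : seq = seq.take i0 ++ seq[i0] :: seq.drop (i0 + 1) := by
      conv_lhs => rw [← List.take_append_drop i0 seq]
      rw [List.drop_eq_getElem_cons hk]
    have hlen : (seq.take i0).length = i0 := by
      rw [List.length_take]; omega
    rw [show PySem.List.enumerate seq 0
        = PySem.List.enumerate (seq.take i0) 0
          ++ ((i0 : Int), seq[i0]) :: PySem.List.enumerate (seq.drop (i0 + 1)) ((i0 : Int) + 1)
      from by
        conv_lhs => rw [hseq]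
        rw [PySem.List.enumerate_append, PySem.List.enumerate_cons, hlen]
        norm_num]
    rw [List.foldl_append, List.foldl_cons]
    rw [if_neg (by simp [hv])]
    rw [foldl_left_part (i0 : Int) (seq.take i0) _ 0 (by rw [hlen]; omega)]
    rw [hlen]
    have hi0le : (i0 : Int) < (seq.length : Int) := by exact_mod_cast Nat.cast_lt.mpr hk
    have hlenI : (((List.take i0 seq).length : Nat) : Int) = (i0 : Int) := by rw [hlen]
    cases hl : PySem.List.index? (seq.take i0).reverse 2 with
    | none =>
      rw [foldl_right_part (i0 : Int) (seq.drop (i0 + 1)) _ ((i0 : Int) + 1) (by omega)]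
      cases hr : PySem.List.index? (seq.drop (i0 + 1)) 2 with
      | none =>
        simp only []
        exact pvNN seq.length i0 hk
      | some k' =>
        obtain ⟨hk', -, -⟩ := PySem.List.getElem_of_index?_eq_some hr
        rw [List.length_drop] at hk'
        simp only []
        exact pvNS seq.length i0 k' hk hk'
    | some k =>
      obtain ⟨hkk, -, -⟩ := PySem.List.getElem_of_index?_eq_some hl
      rw [List.length_reverse, List.length_take] at hkk
      have hkk' : k < i0 := by omega
      rw [foldl_right_part (i0 : Int) (seq.drop (i0 + 1)) _ ((i0 : Int) + 1) (by omega)]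
      cases hr : PySem.List.index? (seq.drop (i0 + 1)) 2 with
      | none =>
        simp only []
        exact pvSN seq.length i0 k hk hkk'
      | some k' =>
        obtain ⟨hk', -, -⟩ := PySem.List.getElem_of_index?_eq_some hr
        rw [List.length_drop] at hk'
        simp only []
        exact pvSS seq.length i0 k k' hk hkk' hk'
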